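-- pv_equiv track=rewrite | github.com/cirosantilli/project-euler-solutions | solvers/714.py | is_duodigit
-- ===== SOURCE A (Python) =====
-- def is_duodigit(x: int) -> bool:
--     """Return True if x uses at most two distinct decimal digits."""
--     s = str(x)
--     a = s[0]
--     b = None
--     for ch in s:
--         if ch != a:
--             if b is None:
--                 b = ch
--             elif ch != b:
--                 return False
--     return True
-- ===== SOURCE B (Python) =====
-- def is_duodigit(x: int) -> bool:
--     return len(set(str(x))) <= 2
-- ===== Notes on version B (the rewrite author's own statement) =====
-- stated objective: simpler
-- what changed: Replaces the two-sentinel tracking loop with early exit by a single distinct-character count: build the set of characters of str(x) and compare its size against the allowed count of two, instead of branch logic over two sentinel variables.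
import Mathlib
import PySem

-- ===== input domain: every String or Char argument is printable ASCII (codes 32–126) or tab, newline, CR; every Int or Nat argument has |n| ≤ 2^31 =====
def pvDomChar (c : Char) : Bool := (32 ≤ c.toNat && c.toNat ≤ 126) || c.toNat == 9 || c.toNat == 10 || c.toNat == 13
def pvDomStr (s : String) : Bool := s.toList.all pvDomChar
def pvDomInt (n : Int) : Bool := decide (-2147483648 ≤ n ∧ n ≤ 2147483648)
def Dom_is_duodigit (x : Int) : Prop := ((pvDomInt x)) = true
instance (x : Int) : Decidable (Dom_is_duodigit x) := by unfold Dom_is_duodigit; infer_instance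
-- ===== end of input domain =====

-- B replaces A's two-sentinel loop with early exit by a distinct-character count over a set (simpler).

-- ===== PORT A =====
-- the 'for ch in s' loop, carrying the mutable b : Option Char; early 'return False' = result false
def pvLoopA (a : Char) (b : Option Char) : List Char → Bool
  | [] => true
  | ch :: rest =>
    if ch ≠ a then
      match b with
      | none => pvLoopA a (some ch) rest
      | some bc => if ch ≠ bc then false else pvLoopA a (some bc) rest
    else pvLoopA a b rest

def is_duodigit (x : Int) : Bool :=
  let s := (PySem.Int.toStr x).toList
  match s with
  | [] => false   -- unreachable: str(x) is never empty (s[0] would raise)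
  | a :: _ => pvLoopA a none s

-- ===== PORT B =====
def is_duodigit_alt (x : Int) : Bool :=
  decide (PySem.Set.len (PySem.Set.ofList (PySem.Int.toStr x).toList) ≤ 2)

-- ===== PRECONDITION & SPEC =====
def Spec_is_duodigit (x : Int) (out : Bool) : Prop := out = is_duodigit_alt x
instance (x : Int) (out : Bool) : Decidable (Spec_is_duodigit x out) := by unfold Spec_is_duodigit; infer_instance

-- ===== CLAIM (what is proved, stated in full; the proofs are below) =====
def Claim_equal_is_duodigit : Prop := ∀ (x : Int), Dom_is_duodigit x → Spec_is_duodigit x (is_duodigit x)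

-- ===== LEMMAS AND PROOFS =====

-- the state of A's loop as a set: {a} plus the optional second sentinel
def pvState (a : Char) : Option Char → List Char
  | none => [a]
  | some c => [a, c]

theorem pvSet_len_le_update (s : List Char) (l : List Char) :
    s.length ≤ (PySem.Set.update s l).length := by
  induction l generalizing s with
  | nil => simp [PySem.Set.update]
  | cons ch rest ih =>
    have h1 : s.length ≤ (PySem.Set.add s ch).length := by
      simp only [PySem.Set.add]
      split <;> simp
    calc s.length ≤ (PySem.Set.add s ch).length := h1
      _ ≤ (PySem.Set.update (PySem.Set.add s ch) rest).length := ih _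
      _ = (PySem.Set.update s (ch :: rest)).length := by
          simp [PySem.Set.update]

theorem pvLoopA_eq (l : List Char) : ∀ (a : Char) (b : Option Char),
    (∀ c, b = some c → c ≠ a) →
    pvLoopA a b l = decide ((PySem.Set.update (pvState a b) l).length ≤ 2) := by
  induction l with
  | nil =>
    intro a b hb
    cases b with
    | none => simp [pvLoopA, PySem.Set.update, pvState]
    | some c =>
      have : c ≠ a := hb c rfl
      simp [pvLoopA, PySem.Set.update, pvState]
  | cons ch rest ih =>
    intro a b hb
    by_cases hcha : ch = a
    · have hmem : PySem.Set.add (pvState a b) ch = pvState a b := by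
        cases b <;> simp [pvState, PySem.Set.add, PySem.Set.contains, hcha]
      have hupdate : PySem.Set.update (pvState a b) (ch :: rest)
          = PySem.Set.update (pvState a b) rest := by
        simp [PySem.Set.update, hmem]
      rw [hupdate, ← ih a b hb]
      simp [pvLoopA, hcha]
    · cases b with
      | none =>
        have hadd : PySem.Set.add (pvState a none) ch = pvState a (some ch) := by
          simp [pvState, PySem.Set.add, PySem.Set.contains, hcha]
        have hupdate : PySem.Set.update (pvState a none) (ch :: rest)
            = PySem.Set.update (pvState a (some ch)) rest := by
          simp [PySem.Set.update, hadd]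
        rw [hupdate, ← ih a (some ch) (by intro c hc; cases hc; exact hcha)]
        simp [pvLoopA, hcha]
      | some bc =>
        have hbca : bc ≠ a := hb bc rfl
        by_cases hchb : ch = bc
        · subst hchb
          have hmem : PySem.Set.add (pvState a (some ch)) ch = pvState a (some ch) := by
            simp [pvState, PySem.Set.add, PySem.Set.contains]
          have hupdate : PySem.Set.update (pvState a (some ch)) (ch :: rest)
              = PySem.Set.update (pvState a (some ch)) rest := by
            simp [PySem.Set.update, hmem]
          rw [hupdate, ← ih a (some ch) hb]
          simp [pvLoopA, hcha]
        · -- A returns False; the set already has three distinct members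
          have hadd : PySem.Set.add (pvState a (some bc)) ch = [a, bc, ch] := by
            simp [pvState, PySem.Set.add, PySem.Set.contains, hcha, hchb]
          have h3 : 3 ≤ (PySem.Set.update (pvState a (some bc)) (ch :: rest)).length := by
            have := pvSet_len_le_update [a, bc, ch] rest
            simpa [PySem.Set.update, hadd] using this
          have hfalse : pvLoopA a (some bc) (ch :: rest) = false := by
            simp [pvLoopA, hcha, hchb]
          rw [hfalse, eq_comm, decide_eq_false_iff_not]
          omega

theorem is_duodigit_spec : Claim_equal_is_duodigit := by
  intro x _
  unfold Spec_is_duodigit is_duodigit is_duodigit_alt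
  cases hs : (PySem.Int.toStr x).toList with
  | nil =>
    exfalso
    rw [PySem.Int.toList_toStr] at hs
    revert hs
    unfold PySem.Int.toChars
    split <;> intro h
    · simp at h
    · exact List.ne_nil_of_length_pos Nat.length_toDigits_pos h
  | cons a rest =>
    have hadd : PySem.Set.add [] a = pvState a none := by
      simp [PySem.Set.add, PySem.Set.contains, pvState]
    have hof : PySem.Set.ofList (a :: rest) = PySem.Set.update (pvState a none) rest := by
      rw [PySem.Set.ofList_eq_foldl]
      simp [PySem.Set.update, List.foldl, pvState]
    have hloop : pvLoopA a none (a :: rest)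
        = decide ((PySem.Set.update (pvState a none) rest).length ≤ 2) := by
      rw [show pvLoopA a none (a :: rest) = pvLoopA a none rest by simp [pvLoopA]]
      exact pvLoopA_eq rest a none (by intro c hc; cases hc)
    simp only [hloop, hof, PySem.Set.len]
    congr 1
    simp
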